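-- pv_equiv track=rewrite | github.com/maltonn/Atcoder-archive | arc105/d.py | solve
-- ===== SOURCE A (Python) =====
-- from collections import Counter
--
-- def solve(N,A):
--     #全皿のxor=0にしたら勝ち
--     if N==1:
--         return 'Second'
--     if N==2:
--         if A[0]==A[1]:
--             return 'Second'
--         else:
--             return 'First'
--
--     if N%2==0:#後手で最後
--         C=Counter(A)
--         if all([x%2==0 for x in C.values()]):
--             return 'Second'
--
--         return 'First'
--     else:
--         return 'Second'
-- ===== SOURCE B (Python) =====
-- def solve(N, A):
--     # Odd number of plates: Second wins regardless of the values.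
--     if N % 2 == 1:
--         return 'Second'
--     # Even N: Second wins iff every value occurs an even number of times,
--     # i.e. iff the sorted list splits into adjacent equal pairs.
--     B = sorted(A)
--     i = 0
--     while i + 1 < len(B):
--         if B[i] != B[i + 1]:
--             return 'First'
--         i += 2
--     # a leftover unpaired element (odd length) means some count is odd
--     return 'First' if i < len(B) else 'Second'
-- ===== Notes on version B (the rewrite author's own statement) =====
-- stated objective: alternative
-- what changed: Replaces the N==1/N==2 special cases and the Counter-then-all pass by a parity-first early return plus sort-then-adjacent-pair scan: every count is even iff the sorted list splits into adjacent equal pairs.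
-- outside the precondition, e.g. on solve(2, [1, 1, 2]): A returns 'Second', B returns 'First'; on solve(2, []): A raises IndexError, B returns 'Second'
import Mathlib
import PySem

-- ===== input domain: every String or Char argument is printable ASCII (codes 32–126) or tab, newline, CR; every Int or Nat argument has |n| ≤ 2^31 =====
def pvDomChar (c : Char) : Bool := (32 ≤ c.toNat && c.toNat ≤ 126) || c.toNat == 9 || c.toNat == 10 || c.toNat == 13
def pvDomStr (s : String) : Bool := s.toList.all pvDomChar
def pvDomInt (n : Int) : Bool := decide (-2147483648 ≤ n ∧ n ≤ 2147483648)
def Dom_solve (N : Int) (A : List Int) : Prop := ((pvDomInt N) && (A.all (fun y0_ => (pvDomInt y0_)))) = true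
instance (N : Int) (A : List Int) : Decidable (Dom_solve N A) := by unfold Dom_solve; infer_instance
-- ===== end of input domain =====

-- B replaces A's N==1/N==2 special cases and Counter-then-all pass by a parity-first
-- early return plus a sort-then-adjacent-pair scan (alternative algorithm, O(n log n)).

-- ===== PORT A =====
def solve (N : Int) (A : List Int) : String :=
  if N = 1 then "Second"
  else if N = 2 then
    -- A[0], A[1]: IndexError when A has fewer than two elements (excluded by Pre_)
    match PySem.List.pyGet? A 0, PySem.List.pyGet? A 1 with
    | some a0, some a1 => if a0 = a1 then "Second" else "First"
    | _, _ => ""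
  else if PySem.Int.mod N 2 = 0 then
    let C := PySem.Dict.counter A
    if (C.values.map (fun x => PySem.Int.mod x 2 == 0)).all id then "Second"
    else "First"
  else "Second"

-- ===== PORT B =====
-- B's while loop walking the sorted list two positions at a time: compares each
-- adjacent pair B[i], B[i+1]; a leftover single element (odd length) yields false.
def pairScan : List Int → Bool
  | a :: b :: t => if a ≠ b then false else pairScan t
  | [_] => false
  | [] => true

def solve_alt (N : Int) (A : List Int) : String :=
  if PySem.Int.mod N 2 = 1 then "Second"
  else if pairScan (PySem.List.sorted A (fun x => x) false) then "Second" else "First"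

-- ===== PRECONDITION & SPEC =====
-- Pre_ excludes N = 2 with A.length != 2 (a length mismatched to N): there A raises an
-- IndexError (fewer than two elements) or inspects only A[0] and A[1] while silently
-- ignoring the rest -- an artefact of the mismatched input, outside the natural domain.
def Pre_solve (N : Int) (A : List Int) : Prop := ¬ (N = 2 ∧ (A.length : Int) ≠ 2)
instance (N : Int) (A : List Int) : Decidable (Pre_solve N A) := by unfold Pre_solve; infer_instance
def pvWitness_solve : Int × List Int := (4, [1, 2, 1, 2])

def Spec_solve (N : Int) (A : List Int) (out : String) : Prop := out = solve_alt N A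
instance (N : Int) (A : List Int) (out : String) : Decidable (Spec_solve N A out) := by unfold Spec_solve; infer_instance

-- ===== CLAIM (what is proved, stated in full; the proofs are below) =====
def Claim_equal_solve : Prop := ∀ (N : Int) (A : List Int), Dom_solve N A → Pre_solve N A → Spec_solve N A (solve N A)

-- ===== LEMMAS AND PROOFS =====

-- Parity of a Nat count seen through PySem.Int.mod.
theorem natMod2 (n : Nat) : PySem.Int.mod ((n : Nat) : Int) 2 = 0 ↔ n % 2 = 0 := by
  have h := PySem.Int.mod_natCast n 2
  rw [show ((2 : Int)) = (((2 : Nat) : Int)) from rfl, h]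
  omega

-- On a (≤)-sorted list, the pair scan succeeds iff every value occurs an even number of times.
theorem pairScan_iff_counts : (L : List Int) → L.Pairwise (· ≤ ·) →
    (pairScan L = true ↔ ∀ y : Int, L.count y % 2 = 0)
  | [], _ => by simp [pairScan]
  | [x], _ => by
    simp only [pairScan]
    constructor
    · intro hfalse; cases hfalse
    · intro hc
      exfalso
      have := hc x
      simp at this
  | a :: b :: t, h => by
    rcases List.pairwise_cons.mp h with ⟨ha, hbt⟩
    rcases List.pairwise_cons.mp hbt with ⟨hb, ht⟩
    have ih := pairScan_iff_counts t ht
    by_cases hab : a = b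
    · subst hab
      rw [pairScan, if_neg (by simp)]
      rw [ih]
      have hcc : ∀ y : Int, (a :: a :: t).count y % 2 = t.count y % 2 := by
        intro y
        by_cases hy : y = a
        · subst hy; simp; omega
        · simp [List.count_cons, if_neg (fun h : a = y => hy h.symm)]
      exact forall_congr' (fun y => by rw [hcc y])
    · rw [pairScan, if_pos (by simpa using hab)]
      constructor
      · intro hfalse; cases hfalse
      · intro hc
        exfalso
        have hlt : a < b := lt_of_le_of_ne (ha b (by simp)) hab
        have hnotmem : a ∉ b :: t := by
          intro hm
          rcases List.mem_cons.mp hm with rfl | hmt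
          · exact hab rfl
          · exact absurd (hb a hmt) (not_le.mpr hlt)
        have h1 : (a :: b :: t).count a = 1 := by
          simp [List.count_eq_zero_of_not_mem hnotmem]
        have := hc a
        rw [h1] at this
        omega

-- B's sorted-pair scan decides "every count in A is even".
theorem pairScan_sorted_iff (A : List Int) :
    pairScan (PySem.List.sorted A (fun x => x) false) = true ↔ ∀ y : Int, A.count y % 2 = 0 := by
  have hperm := PySem.List.sorted_perm A (fun x => x) false
  have hp : (PySem.List.sorted A (fun x => x) false).Pairwise (· ≤ ·) := by
    simpa using PySem.List.sorted_pairwise A (fun x => x)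
  rw [pairScan_iff_counts _ hp]
  constructor <;> intro h y <;> have := h y
  · rwa [hperm.count_eq y] at this
  · rwa [hperm.count_eq y]

-- A's Counter test says the same thing: every count is even.
theorem counter_all_even_iff (A : List Int) :
    (((PySem.Dict.counter A).values.map (fun x => PySem.Int.mod x 2 == 0)).all id = true)
      ↔ ∀ y : Int, A.count y % 2 = 0 := by
  have hv : (PySem.Dict.counter A).values
      = (PySem.Set.ofList A).map (fun k => ((A.count k : Nat) : Int)) := by
    simp [PySem.Dict.values, PySem.Dict.items_counter]
  rw [hv, List.map_map]
  simp only [List.all_eq_true, List.mem_map, id_eq, Function.comp_apply]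
  constructor
  · intro h y
    by_cases hy : y ∈ A
    · have hb := h _ ⟨y, (PySem.Set.mem_ofList A y).mpr hy, rfl⟩
      rw [beq_iff_eq] at hb
      exact (natMod2 _).mp hb
    · simp [List.count_eq_zero_of_not_mem hy]
  · rintro h b ⟨k, _, rfl⟩
    rw [beq_iff_eq]
    exact (natMod2 _).mpr (h k)

theorem solve_eq_alt (N : Int) (A : List Int) (hpre : Pre_solve N A) :
    solve N A = solve_alt N A := by
  unfold Pre_solve at hpre
  unfold solve solve_alt
  by_cases h1 : N = 1
  · subst h1
    simp
  · by_cases h2 : N = 2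
    · subst h2
      have hlen : A.length = 2 := by omega
      have hm : ¬ PySem.Int.mod (2 : Int) 2 = 1 := by decide
      match A, hlen with
      | [a0, a1], _ =>
        rw [if_neg h1, if_pos rfl, if_neg hm]
        have hg0 : PySem.List.pyGet? [a0, a1] 0 = some a0 := by
          simp [PySem.List.pyGet?, PySem.List.pyIdx?]
        have hg1 : PySem.List.pyGet? [a0, a1] 1 = some a1 := by
          simp [PySem.List.pyGet?, PySem.List.pyIdx?]
        simp only [hg0, hg1]
        by_cases hab : a0 = a1
        · subst hab
          rw [if_pos rfl,
            if_pos ((pairScan_sorted_iff [a0, a0]).mpr (by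
              intro y
              by_cases hy : y = a0
              · subst hy; simp
              · simp [List.count_cons, if_neg (fun h : a0 = y => hy h.symm)]))]
        · rw [if_neg hab,
            if_neg (fun h => by
              have := (pairScan_sorted_iff [a0, a1]).mp h a0
              simp [Ne.symm hab] at this)]
    · rw [if_neg h1, if_neg h2]
      have hm2 : PySem.Int.mod N 2 = 0 ∨ PySem.Int.mod N 2 = 1 := by
        have hge := PySem.Int.mod_nonneg N (b := 2) (by norm_num)
        have hlt := PySem.Int.mod_lt N (b := 2) (by norm_num)
        omega
      rcases hm2 with he | ho
      · rw [if_pos he, if_neg (by omega : ¬ PySem.Int.mod N 2 = 1)]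
        by_cases hall : ∀ y : Int, A.count y % 2 = 0
        · rw [if_pos ((counter_all_even_iff A).mpr hall),
            if_pos ((pairScan_sorted_iff A).mpr hall)]
        · rw [if_neg (fun h => hall ((counter_all_even_iff A).mp h)),
            if_neg (fun h => hall ((pairScan_sorted_iff A).mp h))]
      · rw [if_neg (by omega : ¬ PySem.Int.mod N 2 = 0), if_pos ho]

-- ===== VERDICT (by name: the statement is the Claim_ definition above) =====
theorem solve_spec : Claim_equal_solve := by
  intro N A _ hpre
  exact solve_eq_alt N A hpre
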